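-- pv_equiv track=rewrite | github.com/ScientificGuitar/advent-of-code | 2022/day10.py | part2
-- ===== SOURCE A (Python) =====
-- def part2(data):
--     """Solve part 2."""
--     cycle = 0
--     x = 1
--     x_register = [x]
--     for instruction in data:
--         match instruction[0]:
--             case "noop":
--                 cycle += 1
--                 x_register.append(x)
--             case "addx":
--                 cycle += 1
--                 x_register.append(x)
--                 cycle += 1
--                 x += int(instruction[1])
--                 x_register.append(x)
--     screen = [[], [], [], [], [], []]
--     for i in range(len(x_register) - 1):
--         draw_col = i % 40
--         draw_row = i // 40
--         x_val = x_register[i]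
--         if abs(draw_col - x_val) > 1:
--             screen[draw_row].append(".")
--         else:
--             screen[draw_row].append("#")
--     result = ""
--     for row in screen:
--         result += "".join(row) + "\n"
--     return result
-- ===== SOURCE B (Python) =====
-- def part2(data):
--     """Solve part 2."""
--     cycle = 0
--     x = 1
--     pixels = ""
--     for instruction in data:
--         op = instruction[0]
--         if op == "noop" or op == "addx":
--             pixels += "#" if abs(cycle % 40 - x) <= 1 else "."
--             cycle += 1
--             if op == "addx":
--                 pixels += "#" if abs(cycle % 40 - x) <= 1 else "."
--                 cycle += 1
--                 x += int(instruction[1])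
--     return "".join(pixels[40 * r:40 * r + 40] + "\n" for r in range(6))
-- ===== Notes on version B (the rewrite author's own statement) =====
-- stated objective: simpler
-- what changed: B fuses everything into one pass that draws each pixel into a flat string at tick time (no x_register history list and no 6-bucket screen of one-char strings), then emits the six rows by slicing the flat pixel string; A first records the whole register history, then replays it index-by-index into per-row lists and joins them.
import Mathlib
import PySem

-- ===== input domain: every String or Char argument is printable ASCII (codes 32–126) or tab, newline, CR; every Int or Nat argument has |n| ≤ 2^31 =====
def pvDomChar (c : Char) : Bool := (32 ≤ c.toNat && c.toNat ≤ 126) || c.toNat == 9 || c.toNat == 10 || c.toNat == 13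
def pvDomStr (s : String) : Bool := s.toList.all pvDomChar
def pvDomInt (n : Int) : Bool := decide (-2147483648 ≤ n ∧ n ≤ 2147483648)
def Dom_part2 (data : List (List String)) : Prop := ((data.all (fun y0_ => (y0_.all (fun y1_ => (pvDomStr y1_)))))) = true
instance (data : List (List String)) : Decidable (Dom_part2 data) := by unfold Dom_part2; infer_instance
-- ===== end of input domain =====

-- B replaces A's two-pass render (record the whole x_register, then replay it into six
-- per-row lists of one-char strings) by a single fused pass that draws each pixel at tick
-- time into one flat pixel string, and prints the six rows by slicing that string.

-- ===== PORT A =====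
-- Python str values are carried as List Char (PySem.Chars).  instruction[0], instruction[1]
-- and int(...) are ported with pyGet?/ofStr?; the .getD defaults are taken exactly where
-- Python raises IndexError/ValueError, i.e. only outside Pre_part2.
def pvStepA (st : Int × Int × List Int) (instruction : List String) : Int × Int × List Int :=
  let cycle := st.1
  let x := st.2.1
  let xreg := st.2.2
  match PySem.List.pyGet? instruction 0 with
  | some "noop" => (cycle + 1, x, xreg ++ [x])
  | some "addx" =>
      let v := ((PySem.List.pyGet? instruction 1).bind PySem.Int.ofStr?).getD 0
      (cycle + 1 + 1, x + v, (xreg ++ [x]) ++ [x + v])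
  | _ => (cycle, x, xreg)

def part2 (data : List (List String)) : String :=
  let s := data.foldl pvStepA (0, 1, [1])
  let xreg := s.2.2
  -- i runs over 0 .. len(x_register)-2, all nonnegative, so Nat % and / are exact for
  -- Python's % and //; x_register[i] is always in range; screen[draw_row].append is
  -- List.modify (a no-op only when draw_row ≥ 6, where Python raises IndexError — outside Pre_part2).
  let screen := (List.range (xreg.length - 1)).foldl
    (fun (screen : List (List (List Char))) i =>
      let draw_col : Int := ((i % 40 : Nat) : Int)
      let draw_row : Nat := i / 40
      let x_val : Int := PySem.List.pyGetD xreg (i : Int) 0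
      if 1 < (draw_col - x_val).natAbs then
        screen.modify draw_row (fun r => r ++ [['.']])
      else
        screen.modify draw_row (fun r => r ++ [['#']]))
    [[], [], [], [], [], []]
  String.ofList (screen.foldl (fun result row => result ++ PySem.Chars.join [] row ++ ['\n']) [])

-- ===== PORT B =====
-- the inline pixel append of Source B ("#" if abs(cycle % 40 - x) <= 1 else "."); cycle ≥ 0
-- always, so Lean's Int % agrees with Python's here
def pvTick (cycle x : Int) (pixels : List Char) : List Char :=
  pixels ++ [if (cycle % 40 - x).natAbs ≤ 1 then '#' else '.']

def pvStepB (st : Int × Int × List Char) (instruction : List String) : Int × Int × List Char :=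
  let cycle := st.1
  let x := st.2.1
  let pixels := st.2.2
  let op := (PySem.List.pyGet? instruction 0).getD ""  -- default taken only where Python raises (outside Pre_part2)
  if op = "noop" then (cycle + 1, x, pvTick cycle x pixels)
  else if op = "addx" then
    let v := ((PySem.List.pyGet? instruction 1).bind PySem.Int.ofStr?).getD 0
    (cycle + 1 + 1, x + v, pvTick (cycle + 1) x (pvTick cycle x pixels))
  else st

def part2_alt (data : List (List String)) : String :=
  let s := data.foldl pvStepB (0, 1, [])
  let pixels := s.2.2
  String.ofList ((PySem.List.pyRange 0 6 1).foldl
    (fun (res : List Char) r =>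
      res ++ PySem.List.slice pixels (some (40 * r)) (some (40 * r + 40)) ++ ['\n']) [])

-- ===== PRECONDITION & SPEC =====
-- Pre_part2 is exactly the set of inputs on which the Python A returns normally: every
-- instruction is nonempty, every "addx" carries a second field int() accepts, and the total
-- cycle count is at most 240 (more cycles make A's screen[draw_row] raise IndexError).
def Pre_part2 (data : List (List String)) : Prop :=
  (∀ instr ∈ data, instr ≠ [] ∧
      (PySem.List.pyGet? instr 0 = some "addx" →
        ((PySem.List.pyGet? instr 1).bind PySem.Int.ofStr?).isSome = true)) ∧
  (data.map (fun instr =>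
      if PySem.List.pyGet? instr 0 = some "noop" then 1
      else if PySem.List.pyGet? instr 0 = some "addx" then 2 else 0)).sum ≤ (240 : Nat)
instance (data : List (List String)) : Decidable (Pre_part2 data) := by unfold Pre_part2; infer_instance

def pvWitness_part2 : List (List String) := [["noop"], ["addx", "3"], ["addx", "-5"], ["noop"]]

def Spec_part2 (data : List (List String)) (out : String) : Prop := out = part2_alt data
instance (data : List (List String)) (out : String) : Decidable (Spec_part2 data out) := by unfold Spec_part2; infer_instance

-- ===== CLAIM (what is proved, stated in full; the proofs are below) =====
def Claim_equal_part2 : Prop := ∀ (data : List (List String)), Dom_part2 data → Pre_part2 data → Spec_part2 data (part2 data)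

-- ===== LEMMAS AND PROOFS =====

-- the pixel drawn for cycle n when the register holds x
def pvPix (n : Nat) (x : Int) : Char := if ((n : Int) % 40 - x).natAbs ≤ 1 then '#' else '.'

-- the pixel row produced by drawing register values xs starting at cycle n
def pvDrawL : Nat → List Int → List Char
  | _, [] => []
  | n, x :: xs => pvPix n x :: pvDrawL (n + 1) xs

theorem pvDrawL_length (l : List Int) : ∀ n, (pvDrawL n l).length = l.length := by
  induction l with
  | nil => intro n; rfl
  | cons x xs ih => intro n; simp [pvDrawL, ih]

theorem pvDrawL_append (l : List Int) : ∀ n x,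
    pvDrawL n (l ++ [x]) = pvDrawL n l ++ [pvPix (n + l.length) x] := by
  induction l with
  | nil => intro n x; simp [pvDrawL]
  | cons y ys ih =>
      intro n x
      simp only [List.cons_append, pvDrawL, ih, List.length_cons]
      rw [show n + 1 + ys.length = n + (ys.length + 1) from by omega]

theorem pvDrawL_append₂ (l : List Int) (n : Nat) (x y : Int) :
    pvDrawL n (l ++ [x, y]) = pvDrawL n l ++ [pvPix (n + l.length) x, pvPix (n + l.length + 1) y] := by
  rw [show l ++ [x, y] = (l ++ [x]) ++ [y] from by simp, pvDrawL_append, pvDrawL_append]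
  simp only [List.length_append, List.length_singleton, List.append_assoc, List.singleton_append,
    show n + (l.length + 1) = n + l.length + 1 from by omega]

theorem pvDrawL_getD (l : List Int) : ∀ n i, i < l.length →
    (pvDrawL n l).getD i ' ' = pvPix (n + i) (l.getD i 0) := by
  induction l with
  | nil => intro n i h; simp at h
  | cons x xs ih =>
      intro n i h
      cases i with
      | zero => simp [pvDrawL]
      | succ j =>
          simp only [pvDrawL, List.getD_cons_succ]
          rw [ih (n + 1) j (by simpa using h)]
          congr 1
          omega

-- joint loop invariant: A's fold keeps (cycle, x, reg ++ [x]); B's fold keeps the cycle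
-- count, the same x, and the pixels drawn from the recorded register prefix reg
theorem pvLoop_inv (data : List (List String)) : ∀ (cA x : Int) (reg : List Int),
    ∃ cA2 x2 reg2,
      data.foldl pvStepA (cA, x, reg ++ [x]) = (cA2, x2, reg2 ++ [x2]) ∧
      data.foldl pvStepB ((reg.length : Int), x, pvDrawL 0 reg) =
        ((reg2.length : Int), x2, pvDrawL 0 reg2) := by
  induction data with
  | nil => intro cA x reg; exact ⟨cA, x, reg, rfl, rfl⟩
  | cons instr rest ih =>
      intro cA x reg
      simp only [List.foldl_cons]
      rcases h : PySem.List.pyGet? instr 0 with _ | s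
      · -- empty instruction: both steps skip
        simpa [pvStepA, pvStepB, h] using ih cA x reg
      · by_cases hn : s = "noop"
        · subst hn
          have hb : pvStepB ((reg.length : Int), x, pvDrawL 0 reg) instr =
              (((reg ++ [x]).length : Int), x, pvDrawL 0 (reg ++ [x])) := by
            simp [pvStepB, h, pvTick, pvDrawL_append, pvPix, add_comm]
          have ha : pvStepA (cA, x, reg ++ [x]) instr = (cA + 1, x, (reg ++ [x]) ++ [x]) := by
            simp [pvStepA, h]
          rw [ha, hb]
          exact ih (cA + 1) x (reg ++ [x])
        · by_cases hx : s = "addx"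
          · subst hx
            have ha : pvStepA (cA, x, reg ++ [x]) instr =
                (cA + 1 + 1, x + ((PySem.List.pyGet? instr 1).bind PySem.Int.ofStr?).getD 0,
                  (((reg ++ [x]) ++ [x]) ++ [x + ((PySem.List.pyGet? instr 1).bind PySem.Int.ofStr?).getD 0])) := by
              simp [pvStepA, h]
            have hb : pvStepB ((reg.length : Int), x, pvDrawL 0 reg) instr =
                ((((reg ++ [x]) ++ [x]).length : Int),
                  x + ((PySem.List.pyGet? instr 1).bind PySem.Int.ofStr?).getD 0,
                  pvDrawL 0 ((reg ++ [x]) ++ [x])) := by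
              simp [pvStepB, h, pvTick, pvDrawL_append₂, pvPix, add_comm]
              ring_nf
            rw [ha, hb]
            exact ih (cA + 1 + 1) (x + ((PySem.List.pyGet? instr 1).bind PySem.Int.ofStr?).getD 0)
              ((reg ++ [x]) ++ [x])
          · -- unknown opcode: both steps skip
            have ha : pvStepA (cA, x, reg ++ [x]) instr = (cA, x, reg ++ [x]) := by
              simp only [pvStepA, h]
              split
              · simp_all
              · simp_all
              · rfl
            have hb : pvStepB ((reg.length : Int), x, pvDrawL 0 reg) instr =
                ((reg.length : Int), x, pvDrawL 0 reg) := by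
              simp [pvStepB, h, hn, hx]
            rw [ha, hb]
            exact ih cA x reg


-- the column segment of the pixel list P that row j/40 holds after n pixels were drawn
def pvSeg (P : List Char) (j n : Nat) : List Char := ((P.take n).drop j).take 40

theorem pvSeg_eq (P : List Char) (j n : Nat) :
    pvSeg P j n = (P.drop j).take (min (n - j) 40) := by
  simp [pvSeg, List.drop_take, List.take_take]
  omega

theorem pvSeg_succ_low (P : List Char) (j : Nat) {n : Nat} (h : n + 1 ≤ j) :
    pvSeg P j (n + 1) = pvSeg P j n := by
  rw [pvSeg_eq, pvSeg_eq]; congr 1; omega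

theorem pvSeg_succ_high (P : List Char) (j : Nat) {n : Nat} (h : j + 40 ≤ n) :
    pvSeg P j (n + 1) = pvSeg P j n := by
  rw [pvSeg_eq, pvSeg_eq]; congr 1; omega

theorem pvSeg_succ_mid (P : List Char) (j : Nat) {n : Nat} (h1 : j ≤ n) (h2 : n < j + 40)
    (h3 : n < P.length) : pvSeg P j (n + 1) = pvSeg P j n ++ [P.getD n ' '] := by
  rw [pvSeg_eq, pvSeg_eq, show min (n + 1 - j) 40 = (n - j) + 1 from by omega,
    show min (n - j) 40 = n - j from by omega, List.take_add_one]
  have hlt : n - j < (P.drop j).length := by simp; omega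
  rw [List.getElem?_eq_getElem hlt]
  simp only [List.getElem_drop, Option.toList_some]
  rw [List.getD_eq_getElem _ _ h3]
  simp only [show j + (n - j) = n from by omega]

-- drawing step of A's second loop, phrased over the flat pixel list P
def pvDrawStep (P : List Char) (screen : List (List (List Char))) (i : Nat) :
    List (List (List Char)) :=
  screen.modify (i / 40) (fun r => r ++ [[P.getD i ' ']])

theorem pvScreen_inv (P : List Char) : ∀ n, n ≤ P.length →
    (List.range n).foldl (pvDrawStep P) [[], [], [], [], [], []] =
      [(pvSeg P 0 n).map (fun c => [c]), (pvSeg P 40 n).map (fun c => [c]),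
       (pvSeg P 80 n).map (fun c => [c]), (pvSeg P 120 n).map (fun c => [c]),
       (pvSeg P 160 n).map (fun c => [c]), (pvSeg P 200 n).map (fun c => [c])] := by
  intro n
  induction n with
  | zero => intro _; simp [pvSeg]
  | succ m ih =>
      intro h
      rw [List.range_succ, List.foldl_append, ih (by omega), List.foldl_cons, List.foldl_nil]
      have hm : m < P.length := by omega
      by_cases c0 : m < 40
      · rw [pvSeg_succ_mid P 0 (by omega) (by omega) hm, pvSeg_succ_low P 40 (by omega),
          pvSeg_succ_low P 80 (by omega), pvSeg_succ_low P 120 (by omega),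
          pvSeg_succ_low P 160 (by omega), pvSeg_succ_low P 200 (by omega)]
        simp [pvDrawStep, show m / 40 = 0 from by omega, List.modify]
      · by_cases c1 : m < 80
        · rw [pvSeg_succ_high P 0 (by omega), pvSeg_succ_mid P 40 (by omega) (by omega) hm,
            pvSeg_succ_low P 80 (by omega), pvSeg_succ_low P 120 (by omega),
            pvSeg_succ_low P 160 (by omega), pvSeg_succ_low P 200 (by omega)]
          simp [pvDrawStep, show m / 40 = 1 from by omega, List.modify]
        · by_cases c2 : m < 120
          · rw [pvSeg_succ_high P 0 (by omega), pvSeg_succ_high P 40 (by omega),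
              pvSeg_succ_mid P 80 (by omega) (by omega) hm, pvSeg_succ_low P 120 (by omega),
              pvSeg_succ_low P 160 (by omega), pvSeg_succ_low P 200 (by omega)]
            simp [pvDrawStep, show m / 40 = 2 from by omega, List.modify]
          · by_cases c3 : m < 160
            · rw [pvSeg_succ_high P 0 (by omega), pvSeg_succ_high P 40 (by omega),
                pvSeg_succ_high P 80 (by omega), pvSeg_succ_mid P 120 (by omega) (by omega) hm,
                pvSeg_succ_low P 160 (by omega), pvSeg_succ_low P 200 (by omega)]
              simp [pvDrawStep, show m / 40 = 3 from by omega, List.modify]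
            · by_cases c4 : m < 200
              · rw [pvSeg_succ_high P 0 (by omega), pvSeg_succ_high P 40 (by omega),
                  pvSeg_succ_high P 80 (by omega), pvSeg_succ_high P 120 (by omega),
                  pvSeg_succ_mid P 160 (by omega) (by omega) hm, pvSeg_succ_low P 200 (by omega)]
                simp [pvDrawStep, show m / 40 = 4 from by omega, List.modify]
              · by_cases c5 : m < 240
                · rw [pvSeg_succ_high P 0 (by omega), pvSeg_succ_high P 40 (by omega),
                    pvSeg_succ_high P 80 (by omega), pvSeg_succ_high P 120 (by omega),
                    pvSeg_succ_high P 160 (by omega), pvSeg_succ_mid P 200 (by omega) (by omega) hm]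
                  simp [pvDrawStep, show m / 40 = 5 from by omega, List.modify]
                · -- pixel past the screen: Lean's modify is a no-op and no segment changes
                  rw [pvSeg_succ_high P 0 (by omega), pvSeg_succ_high P 40 (by omega),
                    pvSeg_succ_high P 80 (by omega), pvSeg_succ_high P 120 (by omega),
                    pvSeg_succ_high P 160 (by omega), pvSeg_succ_high P 200 (by omega)]
                  simp only [pvDrawStep]
                  rw [List.modify_eq_self]
                  simp
                  omega

theorem pvFoldl_congr_mem {α β : Type} (l : List β) (f g : α → β → α) (i : α)
    (h : ∀ x ∈ l, ∀ acc, f acc x = g acc x) : l.foldl f i = l.foldl g i := by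
  induction l generalizing i with
  | nil => rfl
  | cons y ys ih =>
      rw [List.foldl_cons, List.foldl_cons, h y (by simp)]
      exact ih _ (fun x hx acc => h x (by simp [hx]) acc)

-- A's draw loop over range reg.length with register reg ++ [xl] is pvDrawStep on the pixels
theorem pvDraw_eq (reg : List Int) (xl : Int) :
    (List.range reg.length).foldl
      (fun (screen : List (List (List Char))) i =>
        let draw_col : Int := ((i % 40 : Nat) : Int)
        let draw_row : Nat := i / 40
        let x_val : Int := PySem.List.pyGetD (reg ++ [xl]) (i : Int) 0
        if 1 < (draw_col - x_val).natAbs then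
          screen.modify draw_row (fun r => r ++ [['.']])
        else
          screen.modify draw_row (fun r => r ++ [['#']]))
      [[], [], [], [], [], []] =
    (List.range reg.length).foldl (pvDrawStep (pvDrawL 0 reg)) [[], [], [], [], [], []] := by
  apply pvFoldl_congr_mem
  intro i hi acc
  have hilt : i < reg.length := List.mem_range.mp hi
  simp only [PySem.List.pyGetD_natCast]
  rw [List.getD_append _ _ _ _ hilt]
  simp only [pvDrawStep]
  rw [pvDrawL_getD reg 0 i hilt]
  simp only [pvPix, Nat.zero_add]
  by_cases hc : (((i : Nat) : Int) % 40 - reg.getD i 0).natAbs ≤ 1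
  · rw [if_pos hc, if_neg (by push_cast; omega)]
  · rw [if_neg hc, if_pos (by push_cast; omega)]

-- ===== VERDICT (by name: the statement is the Claim_ definition above) =====
theorem part2_spec : Claim_equal_part2 := by
  intro data _ _
  unfold Spec_part2 part2 part2_alt
  obtain ⟨c2, x2, reg2, hA, hB⟩ := pvLoop_inv data 0 1 []
  simp only [List.nil_append, pvDrawL, List.length_nil, Nat.cast_zero] at hA hB
  rw [hA, hB]
  simp only
  rw [show (reg2 ++ [x2]).length - 1 = reg2.length from by simp]
  rw [pvDraw_eq reg2 x2]
  rw [pvScreen_inv (pvDrawL 0 reg2) reg2.length (by rw [pvDrawL_length])]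
  have hP : ∀ j : Nat, pvSeg (pvDrawL 0 reg2) j reg2.length =
      ((pvDrawL 0 reg2).drop j).take 40 := by
    intro j
    rw [pvSeg, show reg2.length = (pvDrawL 0 reg2).length from (pvDrawL_length reg2 0).symm,
      List.take_length]
  rw [show PySem.List.pyRange 0 6 1 = ([0, 1, 2, 3, 4, 5] : List Int) from by decide]
  simp only [List.foldl_cons, List.foldl_nil, hP, PySem.Chars.join_nil_singletons,
    List.nil_append]
  norm_num
  rw [PySem.List.slice_to (pvDrawL 0 reg2) (b := 40) (by norm_num),
    PySem.List.slice_toNat (pvDrawL 0 reg2) (a := 40) (b := 80) (by norm_num) (by norm_num),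
    PySem.List.slice_toNat (pvDrawL 0 reg2) (a := 80) (b := 120) (by norm_num) (by norm_num),
    PySem.List.slice_toNat (pvDrawL 0 reg2) (a := 120) (b := 160) (by norm_num) (by norm_num),
    PySem.List.slice_toNat (pvDrawL 0 reg2) (a := 160) (b := 200) (by norm_num) (by norm_num),
    PySem.List.slice_toNat (pvDrawL 0 reg2) (a := 200) (b := 240) (by norm_num) (by norm_num)]
  simp
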